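-- pv_equiv track=rewrite | github.com/yassirHam/football-prediction | feature_engineering.py | detect_scoring_streak
-- ===== SOURCE A (Python) =====
-- from typing import List, Tuple, Dict, Optional
--
-- def detect_scoring_streak(goals_scored: List[int]) -> Tuple[int, int]:
--     """
--     Detect current scoring streak and dry spell.
--
--     Args:
--         goals_scored: Goals scored in recent matches (most recent first)
--
--     Returns:
--         Tuple of (scoring_streak, dry_spell_streak)
--         - scoring_streak: consecutive games with goals (positive)
--         - dry_spell_streak: consecutive games without goals (positive if current)
--     """
--     if not goals_scored:
--         return 0, 0
--
--     scoring_streak = 0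
--     dry_spell = 0
--
--     # Check current streak
--     for goals in goals_scored:
--         if goals > 0:
--             if dry_spell == 0:  # Still on scoring streak
--                 scoring_streak += 1
--             else:  # Broke dry spell
--                 break
--         else:
--             if scoring_streak == 0:  # Still on dry spell
--                 dry_spell += 1
--             else:  # Broke scoring streak
--                 break
--
--     return scoring_streak, dry_spell
-- ===== SOURCE B (Python) =====
-- def detect_scoring_streak(goals_scored):
--     # Stage 1: classify every match as scoring (True) or dry (False).
--     flags = [g > 0 for g in goals_scored]
--     if not flags:
--         return (0, 0)
--     # Stage 2: the leading run ends at the first opposite flag.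
--     try:
--         run = flags.index(not flags[0])
--     except ValueError:
--         run = len(flags)
--     return (run, 0) if flags[0] else (0, run)
-- ===== Notes on version B (the rewrite author's own statement) =====
-- stated objective: alternative
-- what changed: Replaces the interleaved two-counter break loop with two staged passes: first map every game to a scoring/dry boolean, then locate the end of the leading run with list.index of the first opposite flag.
import Mathlib
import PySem

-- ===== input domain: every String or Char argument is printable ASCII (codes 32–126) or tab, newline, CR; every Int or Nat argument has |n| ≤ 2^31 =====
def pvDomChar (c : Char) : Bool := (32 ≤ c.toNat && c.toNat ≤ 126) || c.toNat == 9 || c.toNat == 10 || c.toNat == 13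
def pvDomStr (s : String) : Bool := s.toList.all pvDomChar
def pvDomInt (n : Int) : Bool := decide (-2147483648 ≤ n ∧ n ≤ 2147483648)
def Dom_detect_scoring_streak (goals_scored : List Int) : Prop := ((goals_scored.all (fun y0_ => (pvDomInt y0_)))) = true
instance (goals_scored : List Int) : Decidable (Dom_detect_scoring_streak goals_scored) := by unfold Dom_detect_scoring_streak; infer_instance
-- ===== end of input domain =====

-- B stages the work: map each game to a scoring/dry boolean, then find the leading run's end via index of the first opposite flag; objective: alternative decomposition, same cost.

-- ===== PORT A =====
-- the for-loop over goals_scored with state (scoring_streak, dry_spell) and break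
def pvALoop : List Int → Int → Int → Int × Int
  | [], s, d => (s, d)
  | g :: rest, s, d =>
    if g > 0 then
      if d = 0 then pvALoop rest (s + 1) d else (s, d)
    else
      if s = 0 then pvALoop rest s (d + 1) else (s, d)

def detect_scoring_streak (goals_scored : List Int) : Int × Int :=
  if goals_scored = [] then (0, 0)
  else pvALoop goals_scored 0 0

-- ===== PORT B =====
def detect_scoring_streak_alt (goals_scored : List Int) : Int × Int :=
  let flags := goals_scored.map (fun g => decide (g > 0))
  match flags with
  | [] => (0, 0)
  | f0 :: _ =>
    let run : Int :=
      match PySem.List.index? flags (!f0) with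
      | some i => (i : Int)
      | none => (flags.length : Int)
    if f0 then (run, 0) else (0, run)

-- ===== PRECONDITION & SPEC =====
def Spec_detect_scoring_streak (goals_scored : List Int) (out : Int × Int) : Prop := out = detect_scoring_streak_alt goals_scored
instance (goals_scored : List Int) (out : Int × Int) : Decidable (Spec_detect_scoring_streak goals_scored out) := by unfold Spec_detect_scoring_streak; infer_instance

-- ===== CLAIM =====
def Claim_equal_detect_scoring_streak : Prop := ∀ (goals_scored : List Int), Dom_detect_scoring_streak goals_scored → Spec_detect_scoring_streak goals_scored (detect_scoring_streak goals_scored)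

-- ===== LEMMAS AND PROOFS =====
-- run-length expressed as the index search B performs
def pvRun (b : Bool) (l : List Int) : Int :=
  match PySem.List.index? (l.map (fun g => decide (g > 0))) (!b) with
  | some i => (i : Int)
  | none => (l.length : Int)

theorem pvRun_nil (b : Bool) : pvRun b [] = 0 := by
  simp [pvRun, PySem.List.index?]

theorem pvRun_cons_same (b : Bool) (g : Int) (l : List Int)
    (h : decide (g > 0) = b) : pvRun b (g :: l) = 1 + pvRun b l := by
  have hne : decide (g > 0) ≠ (!b) := by rw [h]; cases b <;> simp
  unfold pvRun
  rw [List.map_cons, PySem.List.index?_cons_of_ne _ hne]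
  cases hidx : PySem.List.index? (l.map (fun g => decide (g > 0))) (!b) with
  | none => simp; omega
  | some i => simp; omega

theorem pvRun_cons_opp (b : Bool) (g : Int) (l : List Int)
    (h : decide (g > 0) = (!b)) : pvRun b (g :: l) = 0 := by
  unfold pvRun
  rw [List.map_cons, h, PySem.List.index?_cons_self]
  simp

theorem pvALoop_scoring (l : List Int) : ∀ s : Int, 0 < s →
    pvALoop l s 0 = (s + pvRun true l, 0) := by
  induction l with
  | nil => intro s _; simp [pvALoop, pvRun_nil]
  | cons g rest ih =>
    intro s hs
    by_cases hg : g > 0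
    · have h1 : pvALoop (g :: rest) s 0 = pvALoop rest (s + 1) 0 := by
        simp [pvALoop, hg]
      rw [h1, ih (s + 1) (by omega), pvRun_cons_same true g rest (by simp [hg])]
      rw [add_assoc]
    · have hs' : s ≠ 0 := by omega
      rw [pvRun_cons_opp true g rest (by simp; omega)]
      simp [pvALoop, hg, hs']
theorem pvALoop_dry (l : List Int) : ∀ d : Int, 0 < d →
    pvALoop l 0 d = (0, d + pvRun false l) := by
  induction l with
  | nil => intro d _; simp [pvALoop, pvRun_nil]
  | cons g rest ih =>
    intro d hd
    by_cases hg : g > 0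
    · have hd' : d ≠ 0 := by omega
      rw [pvRun_cons_opp false g rest (by simp [hg])]
      simp [pvALoop, hg, hd']
    · have h1 : pvALoop (g :: rest) 0 d = pvALoop rest 0 (d + 1) := by
        simp [pvALoop, hg]
      rw [h1, ih (d + 1) (by omega), pvRun_cons_same false g rest (by simp; omega)]
      rw [add_assoc]

theorem alt_eq_run (g : Int) (rest : List Int) :
    detect_scoring_streak_alt (g :: rest) =
      if g > 0 then (pvRun true (g :: rest), 0) else (0, pvRun false (g :: rest)) := by
  by_cases hg : g > 0 <;> simp [detect_scoring_streak_alt, pvRun, hg]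

-- ===== VERDICT =====
theorem detect_scoring_streak_spec : Claim_equal_detect_scoring_streak := by
  intro goals_scored _
  unfold Spec_detect_scoring_streak
  cases goals_scored with
  | nil => rfl
  | cons g rest =>
    rw [alt_eq_run]
    by_cases hg : g > 0
    · have h1 : detect_scoring_streak (g :: rest) = pvALoop rest 1 0 := by
        simp [detect_scoring_streak, pvALoop, hg]
      rw [h1, pvALoop_scoring rest 1 one_pos,
        pvRun_cons_same true g rest (by simp [hg])]
      simp [hg, add_comm]
    · have h1 : detect_scoring_streak (g :: rest) = pvALoop rest 0 1 := by
        simp [detect_scoring_streak, pvALoop, hg]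
      rw [h1, pvALoop_dry rest 1 one_pos,
        pvRun_cons_same false g rest (by simp; omega)]
      simp [hg, add_comm]
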